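-- pv_equiv track=rewrite | github.com/benstobbs/British-Informatics-Olympiad-Python-Solutions | BIO06/Q2 - Rules.py | genpos
-- ===== SOURCE A (Python) =====
-- def genpos(ruleset):
--     if len(ruleset) == 1:
--         return ruleset[0]
--     else:
--         poss = []
--         for r in ruleset[0]:
--             [poss.append(r + g) for g in genpos(ruleset[1:])]
--         return poss
-- ===== SOURCE B (Python) =====
-- def genpos(ruleset):
--     # Build the product back-to-front: compute each suffix's result once and reuse it.
--     poss = ruleset[-1]
--     for group in reversed(ruleset[:-1]):
--         poss = [r + g for r in group for g in poss]
--     return poss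
-- ===== Notes on version B (the rewrite author's own statement) =====
-- stated objective: alternative
-- what changed: Replaces A's recursion that recomputes genpos(ruleset[1:]) once per element of the first group with a single back-to-front loop that computes each suffix product once and reuses it.
import Mathlib
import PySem

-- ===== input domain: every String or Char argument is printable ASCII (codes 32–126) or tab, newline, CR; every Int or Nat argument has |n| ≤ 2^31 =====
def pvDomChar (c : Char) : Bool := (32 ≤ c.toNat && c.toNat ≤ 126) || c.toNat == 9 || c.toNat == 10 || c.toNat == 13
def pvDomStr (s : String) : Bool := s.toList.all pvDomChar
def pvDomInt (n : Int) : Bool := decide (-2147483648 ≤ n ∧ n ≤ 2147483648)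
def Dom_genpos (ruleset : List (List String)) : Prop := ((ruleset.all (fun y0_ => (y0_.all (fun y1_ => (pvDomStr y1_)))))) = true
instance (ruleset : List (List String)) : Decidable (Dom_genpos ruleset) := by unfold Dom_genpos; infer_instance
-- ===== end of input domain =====

-- ===== PORT A =====
-- B changes: one back-to-front pass computing each suffix product once instead of A's
-- recursion that recomputes the suffix result for every element of the first group (objective: alternative).
def genpos : List (List String) → List String
  | [] => []          -- unreachable under Pre_genpos (Python raises IndexError on [])
  | [g] => g
  | g :: h :: t =>
      -- for r in ruleset[0]: for s in genpos(ruleset[1:]): poss.append(r + s)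
      g.flatMap (fun r => (genpos (h :: t)).map (fun s => r ++ s))

-- ===== PORT B =====
def genpos_alt (ruleset : List (List String)) : List String :=
  -- poss = ruleset[-1]; for group in reversed(ruleset[:-1]): poss = [r+g for r in group for g in poss]
  match ruleset.reverse with
  | [] => []          -- unreachable under Pre_genpos (Python raises IndexError on [])
  | last :: revPrefix =>
      revPrefix.foldl (fun poss group => group.flatMap (fun r => poss.map (fun g => r ++ g))) last

-- ===== PRECONDITION & SPEC =====
-- Pre_ excludes only the empty ruleset, on which both Pythons raise IndexError.
def Pre_genpos (ruleset : List (List String)) : Prop := ruleset ≠ []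
instance (ruleset : List (List String)) : Decidable (Pre_genpos ruleset) := by unfold Pre_genpos; infer_instance
def pvWitness_genpos : List (List String) := [[]]
def Spec_genpos (ruleset : List (List String)) (out : List String) : Prop := out = genpos_alt ruleset
instance (ruleset : List (List String)) (out : List String) : Decidable (Spec_genpos ruleset out) := by unfold Spec_genpos; infer_instance

-- ===== CLAIM (what is proved, stated in full; the proofs are below) =====
def Claim_equal_genpos : Prop := ∀ (ruleset : List (List String)), Dom_genpos ruleset → Pre_genpos ruleset → Spec_genpos ruleset (genpos ruleset)

-- ===== LEMMAS AND PROOFS =====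

-- One step of B's fold, read off the cons structure: prepending a group applies it to the suffix result.
theorem genpos_alt_cons (g : List String) (rest : List (List String)) (h : rest ≠ []) :
    genpos_alt (g :: rest) = g.flatMap (fun r => (genpos_alt rest).map (fun s => r ++ s)) := by
  obtain ⟨last, rr, hr⟩ : ∃ last rr, rest.reverse = last :: rr := by
    cases hrev : rest.reverse with
    | nil => exact absurd (List.reverse_eq_nil_iff.mp hrev) h
    | cons a l => exact ⟨a, l, rfl⟩
  unfold genpos_alt
  simp only [List.reverse_cons, hr, List.cons_append, List.foldl_append, List.foldl_cons,
    List.foldl_nil]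

-- ===== VERDICT (by name: the statement is the Claim_ definition above) =====
theorem genpos_eq_alt : ∀ (ruleset : List (List String)), ruleset ≠ [] → genpos ruleset = genpos_alt ruleset := by
  intro ruleset hpre
  induction ruleset with
  | nil => exact absurd rfl hpre
  | cons g rest ih =>
    cases rest with
    | nil => simp [genpos, genpos_alt]
    | cons h t =>
      rw [genpos, genpos_alt_cons g (h :: t) (by simp), ih (by simp)]

theorem genpos_spec : Claim_equal_genpos := by
  intro ruleset _ hpre
  exact genpos_eq_alt ruleset hpre
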